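-- pv_equiv track=rewrite | github.com/DianaCarcea/PYTHON | Lab2/Lab9.py | find_bad_places
-- ===== SOURCE A (Python) =====
-- def find_bad_places(matrix):
--     bad_places = []
--     nr_row = len(matrix)
--     nr_col = len(matrix[0])
--     for col in range(nr_col):
--         for row in range(1, nr_row):
--             for k in range(row):
--                 if matrix[row][col] <= matrix[k][col]:
--                     bad_places.append((row, col))
--                     break
--
--     return bad_places
-- ===== SOURCE B (Python) =====
-- def find_bad_places(matrix):
--     # One pass per column keeping a running maximum of the earlier cells:
--     # matrix[row][col] <= some earlier cell  iff  it is <= the running max.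
--     bad_places = []
--     for col in range(len(matrix[0])):
--         running_max = matrix[0][col]
--         for row in range(1, len(matrix)):
--             v = matrix[row][col]
--             if v <= running_max:
--                 bad_places.append((row, col))
--             else:
--                 running_max = v
--     return bad_places
-- ===== Notes on version B (the rewrite author's own statement) =====
-- stated objective: faster
-- what changed: Replaced A's inner scan over all earlier rows (break on first match) by a single running per-column maximum: a cell is bad iff it is <= the running max of the cells above it.
import Mathlib
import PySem

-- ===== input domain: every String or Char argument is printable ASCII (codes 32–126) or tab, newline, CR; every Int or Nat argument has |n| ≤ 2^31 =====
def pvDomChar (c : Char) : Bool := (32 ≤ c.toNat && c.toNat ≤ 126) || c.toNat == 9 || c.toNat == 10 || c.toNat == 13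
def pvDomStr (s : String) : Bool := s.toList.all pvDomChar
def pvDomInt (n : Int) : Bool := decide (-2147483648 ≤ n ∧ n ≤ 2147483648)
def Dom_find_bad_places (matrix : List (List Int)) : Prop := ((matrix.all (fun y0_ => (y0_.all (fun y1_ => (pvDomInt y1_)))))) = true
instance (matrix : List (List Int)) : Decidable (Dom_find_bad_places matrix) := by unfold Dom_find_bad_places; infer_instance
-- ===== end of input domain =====

-- B replaces A's inner scan over all earlier rows by a running per-column maximum
-- (same values and order; timing objective: asymptotic, O(rows^2·cols) → O(rows·cols)).

-- shared indexing helper: matrix[r][c] (in range on every input admitted by Pre_)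
def pvCell (matrix : List (List Int)) (r c : Int) : Int :=
  PySem.List.pyGetD (PySem.List.pyGetD matrix r []) c 0

-- ===== PORT A =====
def find_bad_places (matrix : List (List Int)) : List (Int × Int) :=
  let nr_row : Int := matrix.length
  let nr_col : Int := (PySem.List.pyGetD matrix 0 []).length
  (PySem.List.pyRange 0 nr_col 1).foldl (fun acc col =>
    (PySem.List.pyRange 1 nr_row 1).foldl (fun acc row =>
      -- 'for k in range(row): if …: append; break' = append once if any earlier k matches
      if (PySem.List.pyRange 0 row 1).any (fun k =>
            pvCell matrix row col ≤ pvCell matrix k col)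
      then acc ++ [(row, col)]
      else acc) acc) []

-- ===== PORT B =====
def find_bad_places_alt (matrix : List (List Int)) : List (Int × Int) :=
  (PySem.List.pyRange 0 ((PySem.List.pyGetD matrix 0 []).length : Int) 1).foldl (fun acc col =>
    ((PySem.List.pyRange 1 (matrix.length : Int) 1).foldl (fun st row =>
        let v := pvCell matrix row col
        if v ≤ st.2 then (st.1 ++ [(row, col)], st.2) else (st.1, v))
      (acc, pvCell matrix 0 col)).1) []

-- ===== PRECONDITION & SPEC =====
-- Pre_ excludes exactly the inputs where A raises IndexError: the empty matrix
-- (len(matrix[0])) and matrices whose first row is longer than some later row.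
def Pre_find_bad_places (matrix : List (List Int)) : Prop :=
  matrix ≠ [] ∧ ∀ r ∈ matrix, (matrix.headI).length ≤ r.length
instance (matrix : List (List Int)) : Decidable (Pre_find_bad_places matrix) := by
  unfold Pre_find_bad_places; infer_instance

def pvWitness_find_bad_places : List (List Int) := [[3, 1], [2, 5], [2, 4]]

def Spec_find_bad_places (matrix : List (List Int)) (out : List (Int × Int)) : Prop := out = find_bad_places_alt matrix
instance (matrix : List (List Int)) (out : List (Int × Int)) : Decidable (Spec_find_bad_places matrix out) := by unfold Spec_find_bad_places; infer_instance

-- ===== CLAIM (what is proved, stated in full; the proofs are below) =====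
def Claim_equal_find_bad_places : Prop := ∀ (matrix : List (List Int)), Dom_find_bad_places matrix → Pre_find_bad_places matrix → Spec_find_bad_places matrix (find_bad_places matrix)

-- ===== LEMMAS AND PROOFS =====

-- A's inner 'any' test spelled as an existential
lemma pv_any_iff (g : Int → Int) (x a : Int) :
    ((PySem.List.pyRange 0 a 1).any (fun k => g x ≤ g k) = true)
      ↔ ∃ k, 0 ≤ k ∧ k < a ∧ g x ≤ g k := by
  simp [List.any_eq_true, PySem.List.mem_pyRange_one, and_assoc]

-- core loop invariant: the running max equals the max of the earlier cells
lemma pv_inner (g : Int → Int) (n : Int) :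
    ∀ a : Int, 1 ≤ a →
    ∀ (acc : List (Int × Int)) (run : Int) (c : Int),
      (∀ k, 0 ≤ k → k < a → g k ≤ run) →
      (∃ k, 0 ≤ k ∧ k < a ∧ g k = run) →
      (PySem.List.pyRange a n 1).foldl (fun acc row =>
          if (PySem.List.pyRange 0 row 1).any (fun k => g row ≤ g k)
          then acc ++ [(row, c)] else acc) acc
      = ((PySem.List.pyRange a n 1).foldl (fun st row =>
          let v := g row
          if v ≤ st.2 then (st.1 ++ [(row, c)], st.2) else (st.1, v))
          (acc, run)).1 := by
  intro a
  by_cases hle : n ≤ a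
  · intro _ acc run c _ _
    rw [PySem.List.pyRange_one_eq_nil hle]; simp
  · rw [not_le] at hle
    have hterm : (n - (a + 1)).toNat < (n - a).toNat := by omega
    intro ha acc run c hub hex
    rw [PySem.List.pyRange_one_cons hle]
    simp only [List.foldl_cons]
    by_cases hv : g a ≤ run
    · have hany : (PySem.List.pyRange 0 a 1).any (fun k => g a ≤ g k) = true := by
        rw [pv_any_iff]
        obtain ⟨k, hk0, hka, hkr⟩ := hex
        exact ⟨k, hk0, hka, hkr ▸ hv⟩
      rw [if_pos hany, if_pos hv]
      exact pv_inner g n (a + 1) (by omega) (acc ++ [(a, c)]) run c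
        (fun k hk0 hka => by
          rcases lt_or_ge k a with h | h
          · exact hub k hk0 h
          · have : k = a := by omega
            simpa [this] using hv)
        (by obtain ⟨k, hk0, hka, hkr⟩ := hex; exact ⟨k, hk0, by omega, hkr⟩)
    · rw [not_le] at hv
      have hany : ¬ (PySem.List.pyRange 0 a 1).any (fun k => g a ≤ g k) = true := by
        rw [pv_any_iff]
        rintro ⟨k, hk0, hka, hkr⟩
        exact absurd (le_trans hkr (hub k hk0 hka)) (by omega)
      rw [if_neg hany, if_neg (by omega : ¬ g a ≤ run)]
      exact pv_inner g n (a + 1) (by omega) acc (g a) c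
        (fun k hk0 hka => by
          rcases lt_or_ge k a with h | h
          · exact le_of_lt (lt_of_le_of_lt (hub k hk0 h) hv)
          · have : k = a := by omega
            simp [this])
        ⟨a, by omega, by omega, rfl⟩
termination_by a => (n - a).toNat

lemma pv_foldl_congr {α β : Type} (l : List β) (f₁ f₂ : List α → β → List α)
    (h : ∀ acc b, f₁ acc b = f₂ acc b) :
    ∀ acc, l.foldl f₁ acc = l.foldl f₂ acc := by
  induction l with
  | nil => intro acc; rfl
  | cons x xs ih => intro acc; simp only [List.foldl_cons, h]; exact ih _

-- ===== VERDICT (by name: the statement is the Claim_ definition above) =====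
theorem find_bad_places_spec : Claim_equal_find_bad_places := by
  intro matrix _ _
  unfold Spec_find_bad_places find_bad_places find_bad_places_alt
  apply pv_foldl_congr
  intro acc col
  rw [pv_inner (fun k => pvCell matrix k col) (matrix.length : Int) 1 le_rfl acc
        (pvCell matrix 0 col) col
        (fun k hk0 hk1 => by
          have : k = 0 := by omega
          simp [this])
        ⟨0, le_rfl, by norm_num, rfl⟩]
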